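-- pv_equiv track=rewrite | github.com/utharian-code/Bonepoke | Jade/Popcorn/RiffingTheatreCards.py | detect_missing_pieces
-- ===== SOURCE A (Python) =====
-- def detect_missing_pieces(story_context, current_ensemble):
--     """Identify which archetypes are needed to complete the narrative"""
--
--     gap_analysis = {
--         "needs_wisdom": "SISTER_LEAF" not in current_ensemble and "THE_GARDENER" not in current_ensemble,
--         "needs_analysis": "SHERLOCK" not in current_ensemble and "THE_DOOR" not in current_ensemble,
--         "needs_compassion": "NATHAN" not in current_ensemble and "THE_WOUNDED_HEALER" not in current_ensemble,
--         "needs_perspective": "THE_FOOL" not in current_ensemble,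
--         "needs_connection": "THE_BRIDGE" not in current_ensemble and "BROTHER_RIVER" not in current_ensemble,
--         "needs_leadership": "THE_SERVANT_KING" not in current_ensemble
--     }
--
--     missing_pieces = [piece for piece, needed in gap_analysis.items() if needed]
--     return missing_pieces
-- ===== SOURCE B (Python) =====
-- # Gap name provided by each archetype; inverted index over the ensemble.
-- PROVIDERS = {
--     "SISTER_LEAF": "needs_wisdom", "THE_GARDENER": "needs_wisdom",
--     "SHERLOCK": "needs_analysis", "THE_DOOR": "needs_analysis",
--     "NATHAN": "needs_compassion", "THE_WOUNDED_HEALER": "needs_compassion",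
--     "THE_FOOL": "needs_perspective",
--     "THE_BRIDGE": "needs_connection", "BROTHER_RIVER": "needs_connection",
--     "THE_SERVANT_KING": "needs_leadership",
-- }
--
-- CATEGORIES = ["needs_wisdom", "needs_analysis", "needs_compassion",
--               "needs_perspective", "needs_connection", "needs_leadership"]
--
--
-- def detect_missing_pieces(story_context, current_ensemble):
--     """Identify which archetypes are needed to complete the narrative"""
--     satisfied = set()
--     for member in current_ensemble:
--         cat = PROVIDERS.get(member)
--         if cat is not None:
--             satisfied.add(cat)
--     return [c for c in CATEGORIES if c not in satisfied]
-- ===== Notes on version B (the rewrite author's own statement) =====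
-- stated objective: faster
-- what changed: Inverted the direction of the scan: instead of testing each category's markers against the ensemble (ten list-membership scans), B makes ONE pass over the ensemble, hashing each member through an archetype-to-category index into a 'satisfied' set, then lists the categories not satisfied in fixed order.
import Mathlib
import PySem

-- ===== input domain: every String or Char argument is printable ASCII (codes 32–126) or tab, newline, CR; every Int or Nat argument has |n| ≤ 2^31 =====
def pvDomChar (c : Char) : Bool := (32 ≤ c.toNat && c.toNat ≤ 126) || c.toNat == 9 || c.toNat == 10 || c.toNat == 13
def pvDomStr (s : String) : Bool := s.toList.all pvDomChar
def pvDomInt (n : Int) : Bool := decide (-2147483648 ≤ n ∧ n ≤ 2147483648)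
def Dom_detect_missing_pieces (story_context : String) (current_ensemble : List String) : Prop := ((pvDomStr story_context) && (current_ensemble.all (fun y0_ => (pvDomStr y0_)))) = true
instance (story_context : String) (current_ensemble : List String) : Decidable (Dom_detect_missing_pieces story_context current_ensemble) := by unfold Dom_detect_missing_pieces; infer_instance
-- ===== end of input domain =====

-- B inverts the scan direction: one pass over the ensemble through an archetype-to-category index into a 'satisfied' set, then listing the unsatisfied categories in fixed order, instead of A's per-category membership tests over the ensemble.

-- ===== PORT A =====
def detect_missing_pieces (story_context : String) (current_ensemble : List String) : List String :=
  let gap_analysis : PySem.Dict String Bool :=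
    ((((((PySem.Dict.empty.insert "needs_wisdom"
        (!current_ensemble.contains "SISTER_LEAF" && !current_ensemble.contains "THE_GARDENER")).insert "needs_analysis"
        (!current_ensemble.contains "SHERLOCK" && !current_ensemble.contains "THE_DOOR")).insert "needs_compassion"
        (!current_ensemble.contains "NATHAN" && !current_ensemble.contains "THE_WOUNDED_HEALER")).insert "needs_perspective"
        (!current_ensemble.contains "THE_FOOL")).insert "needs_connection"
        (!current_ensemble.contains "THE_BRIDGE" && !current_ensemble.contains "BROTHER_RIVER")).insert "needs_leadership"
        (!current_ensemble.contains "THE_SERVANT_KING"))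
  let missing_pieces := gap_analysis.items.filterMap (fun p => if p.2 then some p.1 else none)
  missing_pieces

-- ===== PORT B =====
def pvProviders : PySem.Dict String String :=
  PySem.Dict.ofList
    [("SISTER_LEAF", "needs_wisdom"),
     ("THE_GARDENER", "needs_wisdom"),
     ("SHERLOCK", "needs_analysis"),
     ("THE_DOOR", "needs_analysis"),
     ("NATHAN", "needs_compassion"),
     ("THE_WOUNDED_HEALER", "needs_compassion"),
     ("THE_FOOL", "needs_perspective"),
     ("THE_BRIDGE", "needs_connection"),
     ("BROTHER_RIVER", "needs_connection"),
     ("THE_SERVANT_KING", "needs_leadership")]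

def pvCategories : List String :=
  ["needs_wisdom", "needs_analysis", "needs_compassion",
   "needs_perspective", "needs_connection", "needs_leadership"]

def detect_missing_pieces_alt (story_context : String) (current_ensemble : List String) : List String :=
  let satisfied : PySem.Set String :=
    current_ensemble.foldl (fun s member =>
      match pvProviders.get? member with
      | some cat => PySem.Set.add s cat
      | none => s) PySem.Set.empty
  pvCategories.filter (fun c => !(PySem.Set.contains satisfied c))

-- ===== PRECONDITION & SPEC =====
def Spec_detect_missing_pieces (story_context : String) (current_ensemble : List String) (out : List String) : Prop := out = detect_missing_pieces_alt story_context current_ensemble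
instance (story_context : String) (current_ensemble : List String) (out : List String) : Decidable (Spec_detect_missing_pieces story_context current_ensemble out) := by unfold Spec_detect_missing_pieces; infer_instance

-- ===== CLAIM =====
def Claim_equal_detect_missing_pieces : Prop := ∀ (story_context : String) (current_ensemble : List String), Dom_detect_missing_pieces story_context current_ensemble → Spec_detect_missing_pieces story_context current_ensemble (detect_missing_pieces story_context current_ensemble)

-- ===== LEMMAS AND PROOFS =====

-- Membership in the folded 'satisfied' set = some ensemble member maps to c.
theorem pv_fold_contains (ens : List String) (s : PySem.Set String) (c : String) :
    PySem.Set.contains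
      (ens.foldl (fun s member =>
        match pvProviders.get? member with
        | some cat => PySem.Set.add s cat
        | none => s) s) c
      = (PySem.Set.contains s c || ens.any (fun m => pvProviders.get? m == some c)) := by
  induction ens generalizing s with
  | nil => simp
  | cons m rest ih =>
    simp only [List.foldl_cons, List.any_cons, ih]
    cases h : pvProviders.get? m with
    | none => simp [h]
    | some cat =>
      simp only [h, PySem.Set.contains]
      by_cases hc : cat = c
      · subst hc
        simp [PySem.Set.mem_add]
      · have h1 : (c ∈ PySem.Set.add s cat) = (c ∈ s) := by
          simp [PySem.Set.mem_add, Ne.symm hc]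
        have h2 : (cat == c) = false := by simp [hc]
        simp [h1, h2]

-- What the provider index returns, characterised per member.
theorem pv_elt (m c : String) :
    (pvProviders.get? m == some c) = ((m == "SISTER_LEAF" && c == "needs_wisdom") || (m == "THE_GARDENER" && c == "needs_wisdom") || (m == "SHERLOCK" && c == "needs_analysis") || (m == "THE_DOOR" && c == "needs_analysis") || (m == "NATHAN" && c == "needs_compassion") || (m == "THE_WOUNDED_HEALER" && c == "needs_compassion") || (m == "THE_FOOL" && c == "needs_perspective") || (m == "THE_BRIDGE" && c == "needs_connection") || (m == "BROTHER_RIVER" && c == "needs_connection") || (m == "THE_SERVANT_KING" && c == "needs_leadership")) := by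
  have hd : pvProviders = PySem.Dict.mk
    [("SISTER_LEAF", "needs_wisdom"),
     ("THE_GARDENER", "needs_wisdom"),
     ("SHERLOCK", "needs_analysis"),
     ("THE_DOOR", "needs_analysis"),
     ("NATHAN", "needs_compassion"),
     ("THE_WOUNDED_HEALER", "needs_compassion"),
     ("THE_FOOL", "needs_perspective"),
     ("THE_BRIDGE", "needs_connection"),
     ("BROTHER_RIVER", "needs_connection"),
     ("THE_SERVANT_KING", "needs_leadership")] := by decide
  rw [hd]
  simp only [PySem.Dict.get?_mk_cons]
  by_cases h0 : ("SISTER_LEAF" : String) = m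
  · subst h0; simp [eq_comm]
  simp only [show (("SISTER_LEAF" : String) == m) = false from by simp [h0], Bool.false_eq_true, if_false, show (m == "SISTER_LEAF") = false from by simp [Ne.symm h0], Bool.false_and, Bool.false_or]
  by_cases h1 : ("THE_GARDENER" : String) = m
  · subst h1; simp [eq_comm]
  simp only [show (("THE_GARDENER" : String) == m) = false from by simp [h1], Bool.false_eq_true, if_false, show (m == "THE_GARDENER") = false from by simp [Ne.symm h1], Bool.false_and, Bool.false_or]
  by_cases h2 : ("SHERLOCK" : String) = m
  · subst h2; simp [eq_comm]
  simp only [show (("SHERLOCK" : String) == m) = false from by simp [h2], Bool.false_eq_true, if_false, show (m == "SHERLOCK") = false from by simp [Ne.symm h2], Bool.false_and, Bool.false_or]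
  by_cases h3 : ("THE_DOOR" : String) = m
  · subst h3; simp [eq_comm]
  simp only [show (("THE_DOOR" : String) == m) = false from by simp [h3], Bool.false_eq_true, if_false, show (m == "THE_DOOR") = false from by simp [Ne.symm h3], Bool.false_and, Bool.false_or]
  by_cases h4 : ("NATHAN" : String) = m
  · subst h4; simp [eq_comm]
  simp only [show (("NATHAN" : String) == m) = false from by simp [h4], Bool.false_eq_true, if_false, show (m == "NATHAN") = false from by simp [Ne.symm h4], Bool.false_and, Bool.false_or]
  by_cases h5 : ("THE_WOUNDED_HEALER" : String) = m
  · subst h5; simp [eq_comm]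
  simp only [show (("THE_WOUNDED_HEALER" : String) == m) = false from by simp [h5], Bool.false_eq_true, if_false, show (m == "THE_WOUNDED_HEALER") = false from by simp [Ne.symm h5], Bool.false_and, Bool.false_or]
  by_cases h6 : ("THE_FOOL" : String) = m
  · subst h6; simp [eq_comm]
  simp only [show (("THE_FOOL" : String) == m) = false from by simp [h6], Bool.false_eq_true, if_false, show (m == "THE_FOOL") = false from by simp [Ne.symm h6], Bool.false_and, Bool.false_or]
  by_cases h7 : ("THE_BRIDGE" : String) = m
  · subst h7; simp [eq_comm]
  simp only [show (("THE_BRIDGE" : String) == m) = false from by simp [h7], Bool.false_eq_true, if_false, show (m == "THE_BRIDGE") = false from by simp [Ne.symm h7], Bool.false_and, Bool.false_or]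
  by_cases h8 : ("BROTHER_RIVER" : String) = m
  · subst h8; simp [eq_comm]
  simp only [show (("BROTHER_RIVER" : String) == m) = false from by simp [h8], Bool.false_eq_true, if_false, show (m == "BROTHER_RIVER") = false from by simp [Ne.symm h8], Bool.false_and, Bool.false_or]
  by_cases h9 : ("THE_SERVANT_KING" : String) = m
  · subst h9; simp [eq_comm]
  simp only [show (("THE_SERVANT_KING" : String) == m) = false from by simp [h9], Bool.false_eq_true, if_false, show (m == "THE_SERVANT_KING") = false from by simp [Ne.symm h9], Bool.false_and, Bool.false_or]
  simp [PySem.Dict.get?]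

theorem pv_beq_comm (a b : String) : (a == b) = (b == a) := by
  by_cases h : a = b
  · subst h; rfl
  · simp [h, Ne.symm h]

theorem pv_any_beq (ens : List String) (x : String) :
    ens.any (fun m => m == x) = ens.contains x := by
  induction ens with
  | nil => simp
  | cons m rest ih =>
    simp only [List.any_cons, ih, List.contains_cons]
    rw [pv_beq_comm m x]

theorem pv_any_beq_or (ens : List String) (x y : String) :
    ens.any (fun m => m == x || m == y) = (ens.contains x || ens.contains y) := by
  induction ens with
  | nil => simp
  | cons m rest ih =>
    simp only [List.any_cons, List.contains_cons, ih]
    rw [pv_beq_comm m x, pv_beq_comm m y]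
    simp [Bool.or_assoc, Bool.or_comm, Bool.or_left_comm]

theorem pv_cat_wisdom (ens : List String) :
    ens.any (fun m => pvProviders.get? m == some "needs_wisdom")
      = (ens.contains "SISTER_LEAF" || ens.contains "THE_GARDENER") := by
  have h : (fun m => pvProviders.get? m == some "needs_wisdom")
      = (fun m : String => m == "SISTER_LEAF" || m == "THE_GARDENER") := by
    funext m; rw [pv_elt]; simp
  rw [h, pv_any_beq_or]

theorem pv_cat_analysis (ens : List String) :
    ens.any (fun m => pvProviders.get? m == some "needs_analysis")
      = (ens.contains "SHERLOCK" || ens.contains "THE_DOOR") := by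
  have h : (fun m => pvProviders.get? m == some "needs_analysis")
      = (fun m : String => m == "SHERLOCK" || m == "THE_DOOR") := by
    funext m; rw [pv_elt]; simp
  rw [h, pv_any_beq_or]

theorem pv_cat_compassion (ens : List String) :
    ens.any (fun m => pvProviders.get? m == some "needs_compassion")
      = (ens.contains "NATHAN" || ens.contains "THE_WOUNDED_HEALER") := by
  have h : (fun m => pvProviders.get? m == some "needs_compassion")
      = (fun m : String => m == "NATHAN" || m == "THE_WOUNDED_HEALER") := by
    funext m; rw [pv_elt]; simp
  rw [h, pv_any_beq_or]

theorem pv_cat_perspective (ens : List String) :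
    ens.any (fun m => pvProviders.get? m == some "needs_perspective")
      = ens.contains "THE_FOOL" := by
  have h : (fun m => pvProviders.get? m == some "needs_perspective")
      = (fun m : String => m == "THE_FOOL") := by
    funext m; rw [pv_elt]; simp
  rw [h, pv_any_beq]

theorem pv_cat_connection (ens : List String) :
    ens.any (fun m => pvProviders.get? m == some "needs_connection")
      = (ens.contains "THE_BRIDGE" || ens.contains "BROTHER_RIVER") := by
  have h : (fun m => pvProviders.get? m == some "needs_connection")
      = (fun m : String => m == "THE_BRIDGE" || m == "BROTHER_RIVER") := by
    funext m; rw [pv_elt]; simp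
  rw [h, pv_any_beq_or]

theorem pv_cat_leadership (ens : List String) :
    ens.any (fun m => pvProviders.get? m == some "needs_leadership")
      = ens.contains "THE_SERVANT_KING" := by
  have h : (fun m => pvProviders.get? m == some "needs_leadership")
      = (fun m : String => m == "THE_SERVANT_KING") := by
    funext m; rw [pv_elt]; simp
  rw [h, pv_any_beq]

theorem pv_itemsA (b1 b2 b3 b4 b5 b6 : Bool) :
    (PySem.Dict.items
      ((((((PySem.Dict.empty.insert "needs_wisdom" b1).insert "needs_analysis" b2).insert
          "needs_compassion" b3).insert "needs_perspective" b4).insert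
          "needs_connection" b5).insert "needs_leadership" b6))
      = [("needs_wisdom", b1), ("needs_analysis", b2), ("needs_compassion", b3),
         ("needs_perspective", b4), ("needs_connection", b5), ("needs_leadership", b6)] := rfl

-- ===== VERDICT =====
theorem detect_missing_pieces_spec : Claim_equal_detect_missing_pieces := by
  intro sc ens _
  unfold Spec_detect_missing_pieces detect_missing_pieces detect_missing_pieces_alt
  dsimp only
  rw [pv_itemsA]
  simp only [pvCategories, List.filter_cons, List.filter_nil, pv_fold_contains,
             show ∀ c : String, PySem.Set.contains PySem.Set.empty c = false from fun _ => rfl,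
             Bool.false_or, pv_cat_wisdom, pv_cat_analysis, pv_cat_compassion,
             pv_cat_perspective, pv_cat_connection, pv_cat_leadership, Bool.not_or]
  generalize (!ens.contains "SISTER_LEAF" && !ens.contains "THE_GARDENER") = b1
  generalize (!ens.contains "SHERLOCK" && !ens.contains "THE_DOOR") = b2
  generalize (!ens.contains "NATHAN" && !ens.contains "THE_WOUNDED_HEALER") = b3
  generalize (!ens.contains "THE_FOOL") = b4
  generalize (!ens.contains "THE_BRIDGE" && !ens.contains "BROTHER_RIVER") = b5
  generalize (!ens.contains "THE_SERVANT_KING") = b6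
  cases b1 <;> cases b2 <;> cases b3 <;> cases b4 <;> cases b5 <;> cases b6 <;> rfl
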